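-- pv_equiv track=rewrite | github.com/gsrr/leetcode | test.py | f
-- ===== SOURCE A (Python) =====
-- def f(a, m, k):
--     ans = 0
--     f = {1: 1}
--     p = 1
--     for x in a:
--         p = p * x % m
--         print ("p:%d, p_inverse:%d"%(p, pow(k, m - 2, m)))
--         ans += f.get(p * pow(k, m - 2, m) % m, 0)
--         f[p] = f.get(p, 0) + 1
--
--     return ans
-- ===== SOURCE B (Python) =====
-- def f(a, m, k):
--     if not a:
--         return 0
--     inv = pow(k, m - 2, m)
--     p = 1
--     P = [1]
--     for x in a:
--         p = p * x % m
--         print("p:%d, p_inverse:%d" % (p, inv))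
--         P.append(p)
--     # second stage: count matching (earlier, later) pairs grouped by the EARLIER index:
--     # pair (i, j), i < j, counts when P[i] == P[j] * inv % m.
--     T = [q * inv % m for q in P[1:]]
--     ans = 0
--     ps = P[:-1]
--     ts = T
--     while ps:
--         q = ps[0]
--         ans += sum(1 for t in ts if t == q)
--         ps = ps[1:]
--         ts = ts[1:]
--     return ans
-- ===== Notes on version B (the rewrite author's own statement) =====
-- stated objective: alternative
-- what changed: A streams once over the input with a hash frequency table, attributing each pair to its LATER endpoint; B instead runs two staged passes: it first materializes the whole prefix-product list P (printing the same lines) and the target list T, then counts the pair set {(i,j): i<j, P[i]==P[j]*k^(m-2)%m} grouped by the EARLIER endpoint, scanning the remaining target suffix for each prefix position; pow(k,m-2,m) is computed once instead of per element.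
import Mathlib
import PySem

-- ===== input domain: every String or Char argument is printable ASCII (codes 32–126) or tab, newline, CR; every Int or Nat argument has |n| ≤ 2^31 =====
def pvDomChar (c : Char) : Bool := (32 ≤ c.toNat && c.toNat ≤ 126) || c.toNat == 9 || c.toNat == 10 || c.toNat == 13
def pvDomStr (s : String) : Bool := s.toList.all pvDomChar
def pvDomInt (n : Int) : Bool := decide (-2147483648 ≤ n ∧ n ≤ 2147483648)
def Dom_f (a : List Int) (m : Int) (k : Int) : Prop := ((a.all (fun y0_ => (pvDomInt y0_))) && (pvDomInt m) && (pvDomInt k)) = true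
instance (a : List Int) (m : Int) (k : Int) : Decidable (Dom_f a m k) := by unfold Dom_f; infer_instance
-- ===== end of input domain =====

-- B replaces A's single streaming pass with a hash frequency table (pairs grouped by
-- their later endpoint) by two staged passes: build the prefix-product and target lists,
-- then count matching (earlier, later) pairs grouped by the earlier endpoint, with
-- pow(k, m-2, m) computed once. Objective: alternative (not faster). Equivalence is
-- about the RETURN value; both Pythons also print the identical lines.

-- ===== PORT A =====
-- shared port of Python's builtin pow(b, e, m) (both Pythons call it), written as binary
-- exponentiation reducing mod m at every step (so it evaluates on large exponents): each
-- step keeps the value congruent to b^e and reduced by PySem.Int.mod, hence the result is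
-- exactly Python's b**e % m. For e < 0 Python raises unless gcd(b, m) = 1 (Pre_f
-- guarantees that) and then uses the inverse of b mod m; Int.gcdA b m is congruent to
-- that inverse mod m, and the final reduction makes the results equal.
def powmodNat (b : Int) (e : Nat) (m : Int) : Int :=
  if h : e = 0 then PySem.Int.mod 1 m
  else
    let r := powmodNat b (e / 2) m
    let h2 := PySem.Int.mod (r * r) m
    if e % 2 = 1 then PySem.Int.mod (h2 * b) m else h2
decreasing_by exact Nat.div_lt_self (Nat.pos_of_ne_zero h) one_lt_two

def pypow (b e m : Int) : Int :=
  if 0 ≤ e then powmodNat b e.toNat m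
  else powmodNat (Int.gcdA b m) (-e).toNat m

-- (the value pow(k, m-2, m) computed again inside A's print is unused; print is I/O only)
def stepA (m k : Int) (s : Int × PySem.Dict Int Int × Int) (x : Int) :
    Int × PySem.Dict Int Int × Int :=
  let p := PySem.Int.mod (s.2.2 * x) m
  let ans := s.1 + s.2.1.getD (PySem.Int.mod (p * pypow k (m - 2) m) m) 0
  (ans, s.2.1.insert p (s.2.1.getD p 0 + 1), p)

def f (a : List Int) (m : Int) (k : Int) : Int :=
  (a.foldl (stepA m k) (0, PySem.Dict.empty.insert 1 1, 1)).1

-- ===== PORT B =====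
-- the while loop of Source B: ans accumulator; ps[0] / ps[1:] on a nonempty list = head/tail,
-- ts[1:] = ts.tail; sum(1 for t in ts if t == q) is List.countP
def cnt (ans : Int) : List Int → List Int → Int
  | [], _ => ans
  | q :: ps, ts => cnt (ans + (List.countP (fun t => t == q) ts : Int)) ps ts.tail

def f_alt (a : List Int) (m : Int) (k : Int) : Int :=
  match a with
  | [] => 0
  | _ :: _ =>
    let inv := pypow k (m - 2) m
    let P := (a.foldl (fun (s : List Int × Int) x =>
        let p := PySem.Int.mod (s.2 * x) m
        (s.1 ++ [p], p)) ([(1 : Int)], (1 : Int))).1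
    let T := (PySem.List.slice P (some 1) none).map (fun q => PySem.Int.mod (q * inv) m)
    cnt 0 (PySem.List.slice P none (some (-1))) T

-- ===== PRECONDITION & SPEC =====
-- Pre_f excludes exactly the inputs where A raises: with a nonempty list, m = 0 gives
-- ZeroDivisionError in 'p * x % m', and m < 2 with gcd(k, m) ≠ 1 makes pow(k, m-2, m)
-- raise ValueError (negative exponent, no modular inverse). A returns everywhere else.
def Pre_f (a : List Int) (m : Int) (k : Int) : Prop :=
  a = [] ∨ 2 ≤ m ∨ (m ≠ 0 ∧ Int.gcd k m = 1)
instance (a : List Int) (m : Int) (k : Int) : Decidable (Pre_f a m k) := by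
  unfold Pre_f; infer_instance
def pvWitness_f : List Int × Int × Int := ([1, 2, 3, 2], 7, 2)

def Spec_f (a : List Int) (m : Int) (k : Int) (out : Int) : Prop := out = f_alt a m k
instance (a : List Int) (m : Int) (k : Int) (out : Int) : Decidable (Spec_f a m k out) := by
  unfold Spec_f; infer_instance

-- ===== CLAIM (what is proved, stated in full; the proofs are below) =====
def Claim_equal_f : Prop :=
  ∀ (a : List Int) (m : Int) (k : Int), Dom_f a m k → Pre_f a m k → Spec_f a m k (f a m k)

-- ===== LEMMAS AND PROOFS =====
-- Reference objects: the chain of prefix products after p, and the per-step targets.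
def chainP (m : Int) : List Int → Int → List Int
  | [], _ => []
  | x :: xs, p => PySem.Int.mod (p * x) m :: chainP m xs (PySem.Int.mod (p * x) m)

def Ts (m inv : Int) (a : List Int) (p : Int) : List Int :=
  (chainP m a p).map (fun q => PySem.Int.mod (q * inv) m)

-- A's accumulated answer, grouped by the LATER endpoint: at each step, matches of the
-- current target in the seen list.
def countA (m inv : Int) : List Int → Int → List Int → Int
  | [], _, _ => 0
  | x :: xs, p, seen =>
    (seen.count (PySem.Int.mod (PySem.Int.mod (p * x) m * inv) m) : Int) +
      countA m inv xs (PySem.Int.mod (p * x) m) (seen ++ [PySem.Int.mod (p * x) m])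

-- cross pairs between a fixed earlier list s and a target list ts
def cross (s ts : List Int) : Int := (ts.map (fun t => (s.count t : Int))).sum

lemma countP_eq_count (q : Int) (ts : List Int) :
    List.countP (fun t => t == q) ts = ts.count q := rfl

lemma cross_cons (s : List Int) (t : Int) (ts : List Int) :
    cross s (t :: ts) = (s.count t : Int) + cross s ts := by
  simp [cross]

lemma cross_singleton (p : Int) (ts : List Int) : cross [p] ts = (ts.count p : Int) := by
  induction ts with
  | nil => simp [cross]
  | cons t ts ih =>
    rw [cross_cons, ih]
    by_cases h : t = p
    · subst h; simp; omega
    · simp [h, Ne.symm h]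

lemma Ts_cons (m inv x : Int) (xs : List Int) (p : Int) :
    Ts m inv (x :: xs) p =
      PySem.Int.mod (PySem.Int.mod (p * x) m * inv) m ::
        Ts m inv xs (PySem.Int.mod (p * x) m) := rfl

-- A-side: the fold with the dict equals countA, given the dict counts 'seen'.
lemma foldA_eq_countA (m k : Int) :
    ∀ (a : List Int) (ans p : Int) (d : PySem.Dict Int Int) (seen : List Int),
      (∀ q, d.getD q 0 = (seen.count q : Int)) →
      (a.foldl (stepA m k) (ans, d, p)).1 =
        ans + countA m (pypow k (m - 2) m) a p seen := by
  intro a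
  induction a with
  | nil => intro ans p d seen _; simp [countA]
  | cons x xs ih =>
    intro ans p d seen hcnt
    simp only [List.foldl_cons, countA]
    have hstep : stepA m k (ans, d, p) x =
        (ans + (seen.count (PySem.Int.mod (PySem.Int.mod (p * x) m * pypow k (m - 2) m) m) : Int),
         d.insert (PySem.Int.mod (p * x) m) (d.getD (PySem.Int.mod (p * x) m) 0 + 1),
         PySem.Int.mod (p * x) m) := by
      simp [stepA, hcnt]
    rw [hstep, ih]
    · ring
    · intro q
      rw [PySem.Dict.getD_insert]
      by_cases hq : q = PySem.Int.mod (p * x) m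
      · simp [hq, hcnt, List.count_append]
      · simp [hq, hcnt, List.count_append, List.count_singleton]
        omega

-- splitting the seen list: the front part contributes cross pairs with all targets
lemma countA_append (m inv : Int) :
    ∀ (a : List Int) (p : Int) (s1 s2 : List Int),
      countA m inv a p (s1 ++ s2) = cross s1 (Ts m inv a p) + countA m inv a p s2 := by
  intro a
  induction a with
  | nil => intro p s1 s2; simp [countA, Ts, chainP, cross]
  | cons x xs ih =>
    intro p s1 s2
    simp only [countA]
    rw [List.append_assoc, ih, List.count_append, Ts_cons, cross_cons]
    push_cast
    ring

-- B-side: cnt over the dropLast of the chain (grouped by the earlier endpoint)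
-- counts the same pairs as countA (grouped by the later endpoint).
lemma cnt_eq_countA (m inv : Int) :
    ∀ (a : List Int) (p ans : Int),
      cnt ans ((p :: chainP m a p).dropLast) (Ts m inv a p) =
        ans + countA m inv a p [p] := by
  intro a
  induction a with
  | nil => intro p ans; simp [chainP, Ts, cnt, countA]
  | cons x xs ih =>
    intro p ans
    have hchain : chainP m (x :: xs) p =
        PySem.Int.mod (p * x) m :: chainP m xs (PySem.Int.mod (p * x) m) := rfl
    rw [hchain, Ts_cons, List.dropLast_cons₂]
    simp only [cnt, List.tail_cons, countA]
    rw [ih, countA_append m inv xs (PySem.Int.mod (p * x) m) [p] [PySem.Int.mod (p * x) m],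
      cross_singleton, countP_eq_count, List.count_cons, List.count_singleton]
    by_cases h : PySem.Int.mod (PySem.Int.mod (p * x) m * inv) m = p
    · simp only [h, BEq.rfl, if_pos]
      push_cast; ring
    · simp only [beq_iff_eq, h, Ne.symm h, if_neg, not_false_iff]
      push_cast; ring

-- the foldl of B builds exactly 1 :: chain
lemma foldB_build (m : Int) :
    ∀ (a : List Int) (pre : List Int) (p : Int),
      (a.foldl (fun (s : List Int × Int) x =>
          (s.1 ++ [PySem.Int.mod (s.2 * x) m], PySem.Int.mod (s.2 * x) m)) (pre, p)).1 =
        pre ++ chainP m a p := by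
  intro a
  induction a with
  | nil => intro pre p; simp [chainP]
  | cons x xs ih =>
    intro pre p
    simp only [List.foldl_cons, chainP]
    rw [ih, List.append_assoc]
    rfl

-- ===== VERDICT (by name: the statement is the Claim_ definition above) =====
theorem f_spec : Claim_equal_f := by
  intro a m k _ _
  unfold Spec_f
  cases a with
  | nil => rfl
  | cons x xs =>
    show (f (x :: xs) m k) = f_alt (x :: xs) m k
    unfold f f_alt
    rw [foldA_eq_countA m k (x :: xs) 0 1 _ [1]
        (by
          intro q
          by_cases hq : q = 1
          · simp [hq]
          · have hq' : (1 : Int) ≠ q := fun h => hq h.symm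
            simp [PySem.Dict.getD_insert, PySem.Dict.getD_empty, hq, hq'])]
    simp only [foldB_build m (x :: xs) [1] 1]
    rw [show ([1] ++ chainP m (x :: xs) 1 : List Int) = 1 :: chainP m (x :: xs) 1 from rfl,
        PySem.List.slice_from_one, PySem.List.slice_to_neg_one, List.tail_cons]
    rw [show ((chainP m (x :: xs) 1).map
          (fun q => PySem.Int.mod (q * pypow k (m - 2) m) m)) =
        Ts m (pypow k (m - 2) m) (x :: xs) 1 from rfl]
    rw [cnt_eq_countA m (pypow k (m - 2) m) (x :: xs) 1 0]
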